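-- pv_equiv track=rewrite | github.com/mad011408/notsuccess | tools/documents/markdown_tool.py | _parse_tables
-- ===== SOURCE A (Python) =====
-- from typing import Optional, List, Dict, Any
--
-- def _parse_tables(content: str) -> List[List[List[str]]]:
--     """Parse markdown tables"""
--     tables = []
--     lines = content.split('\n')
--     current_table = []
--     in_table = False
--
--     for line in lines:
--         if '|' in line and not line.strip().startswith('```'):
--             cells = [c.strip() for c in line.split('|')[1:-1]]
--             if cells and not all(set(c) <= {'-', ':'} for c in cells):
--                 current_table.append(cells)
--                 in_table = True
--         elif in_table:
--             if current_table:
--                 tables.append(current_table)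
--             current_table = []
--             in_table = False
--
--     if current_table:
--         tables.append(current_table)
--
--     return tables
-- ===== SOURCE B (Python) =====
-- from typing import Optional, List, Dict, Any
-- from itertools import groupby
--
--
-- def _is_table_line(line: str) -> bool:
--     return '|' in line and not line.strip().startswith('```')
--
--
-- def _row_of(line: str) -> Optional[List[str]]:
--     cells = [c.strip() for c in line.split('|')[1:-1]]
--     if cells and not all(set(c) <= {'-', ':'} for c in cells):
--         return cells
--     return None
--
--
-- def _parse_tables(content: str) -> List[List[List[str]]]:
--     """Parse markdown tables (group-by-runs decomposition, no flush flag)"""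
--     tables = []
--     for is_table, run in groupby(content.split('\n'), key=_is_table_line):
--         if is_table:
--             rows = [r for r in map(_row_of, run) if r is not None]
--             if rows:
--                 tables.append(rows)
--     return tables
-- ===== Notes on version B (the rewrite author's own statement) =====
-- stated objective: simpler
-- what changed: Replaces the stateful flag-and-flush loop (current_table/in_table with an elif flush and a trailing flush) by partitioning the lines into maximal runs with itertools.groupby keyed on the table-line predicate, then filtering each True run's rows; the flag and both flush sites disappear.
import Mathlib
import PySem

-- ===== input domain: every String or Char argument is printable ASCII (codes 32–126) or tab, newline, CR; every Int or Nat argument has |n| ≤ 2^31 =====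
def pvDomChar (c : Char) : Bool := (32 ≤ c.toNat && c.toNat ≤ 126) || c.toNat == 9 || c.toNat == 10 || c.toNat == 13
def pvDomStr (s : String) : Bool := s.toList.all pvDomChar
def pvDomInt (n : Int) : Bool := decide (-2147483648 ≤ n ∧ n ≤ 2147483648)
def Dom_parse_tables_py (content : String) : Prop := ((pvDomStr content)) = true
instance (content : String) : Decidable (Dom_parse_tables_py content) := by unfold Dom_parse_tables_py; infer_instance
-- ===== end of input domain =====

-- B replaces A's flag-and-flush loop by a groupby-into-runs decomposition (simpler; same cost).

-- shared line-level helpers (both Pythons contain these expressions verbatim):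
-- '|' in line and not line.strip().startswith('```')
def pvLineIsTable (line : String) : Bool :=
  PySem.Str.isIn "|" line && !(PySem.Str.startswith (PySem.Str.strip line) "```")

-- [c.strip() for c in line.split('|')[1:-1]]  ('|' is a nonempty literal, so split? is always some)
def pvCells (line : String) : List String :=
  (PySem.List.slice ((PySem.Str.split? line "|").getD []) (some 1) (some (-1))).map PySem.Str.strip

-- set(c) <= {'-', ':'}
def pvIsSep (c : String) : Bool := c.toList.all (fun ch => ch == '-' || ch == ':')

-- ===== PORT A =====
def pvLoopA : List String → List (List (List String)) → List (List String) → Bool → List (List (List String))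
  | [], tables, cur, _ => if !cur.isEmpty then tables ++ [cur] else tables
  | line :: rest, tables, cur, in_table =>
    if pvLineIsTable line then
      let cells := pvCells line
      if !cells.isEmpty && !(cells.all pvIsSep) then
        pvLoopA rest tables (cur ++ [cells]) true
      else
        pvLoopA rest tables cur in_table
    else if in_table then
      pvLoopA rest (if !cur.isEmpty then tables ++ [cur] else tables) [] false
    else
      pvLoopA rest tables cur in_table

-- ('\n' is a nonempty literal, so split? is always some)
def parse_tables_py (content : String) : List (List (List String)) :=
  pvLoopA ((PySem.Str.split? content "\n").getD []) [] [] false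

-- ===== PORT B =====
-- _row_of(line)
def pvRowOf (line : String) : Option (List String) :=
  let cells := pvCells line
  if !cells.isEmpty && !(cells.all pvIsSep) then some cells else none

-- hand port of itertools.groupby(lines, key=_is_table_line): maximal runs with their key (built back-to-front; exact)
def pvGroupRuns : List String → List (Bool × List String)
  | [] => []
  | l :: ls =>
    match pvGroupRuns ls with
    | [] => [(pvLineIsTable l, [l])]
    | (k, g) :: rest =>
      if pvLineIsTable l == k then (k, l :: g) :: rest
      else (pvLineIsTable l, [l]) :: (k, g) :: rest

-- the body of B's for-loop over the (is_table, run) groups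
def pvStep (tables : List (List (List String))) (kg : Bool × List String) :
    List (List (List String)) :=
  if kg.1 then
    let rows := kg.2.filterMap pvRowOf
    if !rows.isEmpty then tables ++ [rows] else tables
  else tables

def parse_tables_py_alt (content : String) : List (List (List String)) :=
  (pvGroupRuns ((PySem.Str.split? content "\n").getD [])).foldl pvStep []

-- ===== PRECONDITION & SPEC =====
def Spec_parse_tables_py (content : String) (out : List (List (List String))) : Prop := out = parse_tables_py_alt content
instance (content : String) (out : List (List (List String))) : Decidable (Spec_parse_tables_py content out) := by unfold Spec_parse_tables_py; infer_instance

-- ===== CLAIM (what is proved, stated in full; the proofs are below) =====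
def Claim_equal_parse_tables_py : Prop := ∀ (content : String), Dom_parse_tables_py content → Spec_parse_tables_py content (parse_tables_py content)

-- ===== LEMMAS AND PROOFS =====

-- proof-only normal form: fold a pending table 'cur' over the runs
def pvEmit (cur : List (List String)) : List (List (List String)) :=
  if cur.isEmpty then [] else [cur]

def pvF : List (List String) → List (Bool × List String) → List (List (List String))
  | cur, [] => pvEmit cur
  | cur, (true, g) :: rest => pvF (cur ++ g.filterMap pvRowOf) rest
  | cur, (false, _) :: rest => pvEmit cur ++ pvF [] rest

-- groupby produces runs with alternating keys
lemma pvGroupRuns_chain (ls : List String) :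
    List.IsChain (fun a b : Bool × List String => a.1 ≠ b.1) (pvGroupRuns ls) := by
  induction ls with
  | nil => simp [pvGroupRuns]
  | cons l ls ih =>
    simp only [pvGroupRuns]
    cases h : pvGroupRuns ls with
    | nil => simp
    | cons kg rest =>
      obtain ⟨k, g⟩ := kg
      rw [h] at ih
      by_cases hk : pvLineIsTable l == k
      · simp only [hk, if_true]
        rw [List.isChain_cons] at ih ⊢
        exact ih
      · simp only [if_neg hk]
        rw [List.isChain_cons]
        exact ⟨by simpa using hk, ih⟩
lemma pvF_true_flush (rows : List (List String)) (rest : List (Bool × List String))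
    (h : rest = [] ∨ ∃ g r, rest = (false, g) :: r) :
    pvF rows rest = pvEmit rows ++ pvF [] rest := by
  rcases h with h | ⟨g, r, h⟩ <;> subst h <;> simp [pvF, pvEmit]

lemma pvFoldl_eq_pvF (groups : List (Bool × List String)) (acc : List (List (List String)))
    (hch : List.IsChain (fun a b : Bool × List String => a.1 ≠ b.1) groups) :
    groups.foldl pvStep acc = acc ++ pvF [] groups := by
  induction groups generalizing acc with
  | nil => simp [pvF, pvEmit]
  | cons kg rest ih =>
    obtain ⟨k, g⟩ := kg
    rw [List.isChain_cons] at hch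
    obtain ⟨hhd, hrest⟩ := hch
    cases k with
    | false =>
      rw [List.foldl_cons]
      have hstep : pvStep acc (false, g) = acc := by simp [pvStep]
      rw [hstep, ih acc hrest]
      simp [pvF, pvEmit]
    | true =>
      rw [List.foldl_cons]
      have hshape : rest = [] ∨ ∃ g' r, rest = (false, g') :: r := by
        cases rest with
        | nil => exact Or.inl rfl
        | cons b r =>
          obtain ⟨kb, gb⟩ := b
          have := hhd (kb, gb) (by simp)
          cases kb
          · exact Or.inr ⟨gb, r, rfl⟩
          · simp at this
      have hstep : pvStep acc (true, g) = acc ++ pvEmit (g.filterMap pvRowOf) := by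
        by_cases hr : (g.filterMap pvRowOf).isEmpty <;> simp [pvStep, pvEmit, hr]
      rw [hstep, ih _ hrest, List.append_assoc, pvF,
        ← pvF_true_flush (g.filterMap pvRowOf) rest hshape, List.nil_append]

lemma pvLoopA_eq_pvF (ls : List String) (tables : List (List (List String)))
    (cur : List (List String)) :
    pvLoopA ls tables cur (!cur.isEmpty) = tables ++ pvF cur (pvGroupRuns ls) := by
  induction ls generalizing tables cur with
  | nil => by_cases h : cur.isEmpty <;> simp [pvLoopA, pvF, pvEmit, pvGroupRuns, h]
  | cons l ls ih =>
    by_cases hp : pvLineIsTable l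
    · -- table line: it joins (or starts) the head run; pvF absorbs its optional row
      by_cases hc : (!(pvCells l).isEmpty && !((pvCells l).all pvIsSep)) = true
      · have hr : pvRowOf l = some (pvCells l) := by simp [pvRowOf, hc]
        have hgr : ∀ cur',
            pvF cur' (pvGroupRuns (l :: ls)) = pvF (cur' ++ [pvCells l]) (pvGroupRuns ls) := by
          intro cur'
          simp only [pvGroupRuns]
          cases h : pvGroupRuns ls with
          | nil => simp [pvF, hp, hr]
          | cons kg rest =>
            obtain ⟨k, g⟩ := kg
            cases k
            · simp [pvF, hp, hr]
            · simp [pvF, hp, hr, List.append_assoc]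
        have hne : (!(cur ++ [pvCells l]).isEmpty) = true := by simp
        calc pvLoopA (l :: ls) tables cur (!cur.isEmpty)
            = pvLoopA ls tables (cur ++ [pvCells l]) true := by
              simp [pvLoopA, hp, hc]
          _ = pvLoopA ls tables (cur ++ [pvCells l]) (!(cur ++ [pvCells l]).isEmpty) := by
              rw [hne]
          _ = tables ++ pvF (cur ++ [pvCells l]) (pvGroupRuns ls) := ih tables _
          _ = tables ++ pvF cur (pvGroupRuns (l :: ls)) := by rw [hgr]
      · have hc' : (!(pvCells l).isEmpty && !((pvCells l).all pvIsSep)) = false := by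
          simpa using hc
        have hr : pvRowOf l = none := by simp [pvRowOf, hc']
        have hgr : ∀ cur',
            pvF cur' (pvGroupRuns (l :: ls)) = pvF cur' (pvGroupRuns ls) := by
          intro cur'
          simp only [pvGroupRuns]
          cases h : pvGroupRuns ls with
          | nil => simp [pvF, hp, hr, pvEmit]
          | cons kg rest =>
            obtain ⟨k, g⟩ := kg
            cases k
            · simp [pvF, hp, hr]
            · simp [pvF, hp, hr]
        calc pvLoopA (l :: ls) tables cur (!cur.isEmpty)
            = pvLoopA ls tables cur (!cur.isEmpty) := by
              simp [pvLoopA, hp, hc']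
          _ = tables ++ pvF cur (pvGroupRuns ls) := ih tables cur
          _ = tables ++ pvF cur (pvGroupRuns (l :: ls)) := by rw [hgr]
    · -- non-table line: A flushes (if anything pending), B closes the run
      have hgr : ∀ cur',
          pvF cur' (pvGroupRuns (l :: ls)) = pvEmit cur' ++ pvF [] (pvGroupRuns ls) := by
        intro cur'
        simp only [pvGroupRuns]
        cases h : pvGroupRuns ls with
        | nil => simp [pvF, hp, pvEmit]
        | cons kg rest =>
          obtain ⟨k, g⟩ := kg
          cases k
          · simp [pvF, hp, pvEmit]
          · simp [pvF, hp, pvEmit]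
      by_cases hc : cur.isEmpty
      · have hcur : cur = [] := by simpa using hc
        subst hcur
        calc pvLoopA (l :: ls) tables [] (!(List.isEmpty ([] : List (List String))))
            = pvLoopA ls tables [] (!(List.isEmpty ([] : List (List String)))) := by
              simp [pvLoopA, hp]
          _ = tables ++ pvF [] (pvGroupRuns ls) := ih tables []
          _ = tables ++ pvF [] (pvGroupRuns (l :: ls)) := by
              rw [hgr]; simp [pvEmit]
      · have hne : (!cur.isEmpty) = true := by simpa using hc
        calc pvLoopA (l :: ls) tables cur (!cur.isEmpty)
            = pvLoopA ls (tables ++ [cur]) [] (!(List.isEmpty ([] : List (List String)))) := by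
              rw [hne]; simp [pvLoopA, hp, hne]
          _ = (tables ++ [cur]) ++ pvF [] (pvGroupRuns ls) := ih _ []
          _ = tables ++ pvF cur (pvGroupRuns (l :: ls)) := by
              rw [hgr, pvEmit, if_neg hc, List.append_assoc]

-- ===== VERDICT (by name: the statement is the Claim_ definition above) =====
theorem parse_tables_py_spec : Claim_equal_parse_tables_py := by
  intro content _
  unfold Spec_parse_tables_py parse_tables_py parse_tables_py_alt
  have h := pvLoopA_eq_pvF ((PySem.Str.split? content "\n").getD []) [] []
  simp only [List.isEmpty_nil, Bool.not_true] at h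
  rw [h, pvFoldl_eq_pvF _ _ (pvGroupRuns_chain _)]
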